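-- pv_equiv track=rewrite | github.com/sky1241/MUNINN- | muninn/ui/_tree_engine.py | guardian_find
-- ===== SOURCE A (Python) =====
-- def guardian_find(tree, query):
--     """🔍 Cherche dans l'arbre — par ID, label, ou entry.
--
--     Claude utilise ça pour trouver où aller dans le code.
--     Sky utilise ça pour trouver un nœud par mot-clé.
--
--     Returns:
--         Liste de nœuds matchés.
--     """
--     query_lower = query.lower()
--     results = []
--
--     for n in tree["nodes"]:
--         score = 0
--         # Match exact ID
--         if n["id"].lower() == query_lower:
--             score = 100
--         # Match in label
--         elif query_lower in n.get("label", "").lower():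
--             score = 50
--         # Match in entry
--         elif query_lower in n.get("entry", "").lower():
--             score = 40
--         # Match in desc
--         elif query_lower in n.get("desc", "").lower():
--             score = 30
--
--         if score > 0:
--             results.append((score, n))
--
--     results.sort(key=lambda x: -x[0])
--     return [n for _, n in results]
-- ===== SOURCE B (Python) =====
-- def guardian_find(tree, query):
--     """Bucketed variant: one pass appends each matched node into the bucket for
--     its score; concatenating the buckets in 100/50/40/30 order reproduces the
--     stable descending-score order without sorting."""
--     q = query.lower()
--     b100, b50, b40, b30 = [], [], [], []
--     for n in tree["nodes"]:
--         if n["id"].lower() == q: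
--             b100.append(n)
--         elif q in n.get("label", "").lower():
--             b50.append(n)
--         elif q in n.get("entry", "").lower():
--             b40.append(n)
--         elif q in n.get("desc", "").lower():
--             b30.append(n)
--     return b100 + b50 + b40 + b30
-- ===== Notes on version B (the rewrite author's own statement) =====
-- stated objective: simpler
-- what changed: Replaces collect-(score,node)-pairs-then-stable-sort with a single pass that appends matched nodes directly into four score buckets and concatenates them, eliminating the sort and the score tuples.
import Mathlib
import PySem

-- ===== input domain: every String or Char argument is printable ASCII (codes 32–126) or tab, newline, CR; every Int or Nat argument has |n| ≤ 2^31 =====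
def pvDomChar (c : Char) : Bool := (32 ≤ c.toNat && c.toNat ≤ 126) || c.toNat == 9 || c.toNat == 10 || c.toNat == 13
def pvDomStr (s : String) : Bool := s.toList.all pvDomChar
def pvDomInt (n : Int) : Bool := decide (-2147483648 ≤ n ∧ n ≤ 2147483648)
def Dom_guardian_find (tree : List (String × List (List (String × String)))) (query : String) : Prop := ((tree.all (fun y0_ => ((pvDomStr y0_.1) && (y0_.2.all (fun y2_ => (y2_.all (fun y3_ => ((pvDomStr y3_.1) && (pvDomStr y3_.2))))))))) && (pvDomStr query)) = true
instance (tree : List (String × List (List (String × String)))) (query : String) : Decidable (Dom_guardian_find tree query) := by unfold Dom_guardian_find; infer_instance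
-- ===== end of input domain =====

-- B changes the algorithm (four score buckets instead of collect-and-stable-sort); the claim is A = B wherever A returns.

-- ===== PORT A =====
-- helper of port A: the if/elif score chain of A's loop body
def gfScore (ql : String) (n : List (String × String)) : Int :=
  if PySem.Str.lower ((PySem.Dict.get? (PySem.Dict.mk n) "id").getD "") == ql then 100
  else if PySem.Str.isIn ql (PySem.Str.lower (PySem.Dict.getD (PySem.Dict.mk n) "label" "")) then 50
  else if PySem.Str.isIn ql (PySem.Str.lower (PySem.Dict.getD (PySem.Dict.mk n) "entry" "")) then 40
  else if PySem.Str.isIn ql (PySem.Str.lower (PySem.Dict.getD (PySem.Dict.mk n) "desc" "")) then 30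
  else 0

def guardian_find (tree : List (String × List (List (String × String)))) (query : String) : List (List (String × String)) :=
  let query_lower := PySem.Str.lower query
  let results := ((PySem.Dict.get? (PySem.Dict.mk tree) "nodes").getD []).foldl
    (fun acc n => if decide (0 < gfScore query_lower n) then acc ++ [(gfScore query_lower n, n)] else acc) []
  (PySem.List.sorted results (fun x => -x.1)).map (fun x => x.2)

-- ===== PORT B =====
def guardian_find_alt (tree : List (String × List (List (String × String)))) (query : String) : List (List (String × String)) :=
  let q := PySem.Str.lower query
  let bs := ((PySem.Dict.get? (PySem.Dict.mk tree) "nodes").getD []).foldl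
    (fun (bs : List (List (String × String)) × List (List (String × String)) × List (List (String × String)) × List (List (String × String))) n =>
      if PySem.Str.lower ((PySem.Dict.get? (PySem.Dict.mk n) "id").getD "") == q then (bs.1 ++ [n], bs.2.1, bs.2.2.1, bs.2.2.2)
      else if PySem.Str.isIn q (PySem.Str.lower (PySem.Dict.getD (PySem.Dict.mk n) "label" "")) then (bs.1, bs.2.1 ++ [n], bs.2.2.1, bs.2.2.2)
      else if PySem.Str.isIn q (PySem.Str.lower (PySem.Dict.getD (PySem.Dict.mk n) "entry" "")) then (bs.1, bs.2.1, bs.2.2.1 ++ [n], bs.2.2.2)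
      else if PySem.Str.isIn q (PySem.Str.lower (PySem.Dict.getD (PySem.Dict.mk n) "desc" "")) then (bs.1, bs.2.1, bs.2.2.1, bs.2.2.2 ++ [n])
      else bs)
    ([], [], [], [])
  bs.1 ++ bs.2.1 ++ bs.2.2.1 ++ bs.2.2.2

-- ===== PRECONDITION & SPEC =====
-- Pre_ excludes exactly the inputs where the Python raises KeyError: a tree with no "nodes" key,
-- or a node without an "id" key (both programs raise there alike).
def Pre_guardian_find (tree : List (String × List (List (String × String)))) (query : String) : Prop :=
  (PySem.Dict.get? (PySem.Dict.mk tree) "nodes").isSome = true ∧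
  ∀ n ∈ (PySem.Dict.get? (PySem.Dict.mk tree) "nodes").getD [], (PySem.Dict.get? (PySem.Dict.mk n) "id").isSome = true
instance (tree : List (String × List (List (String × String)))) (query : String) : Decidable (Pre_guardian_find tree query) := by unfold Pre_guardian_find; infer_instance

def pvWitness_guardian_find : (List (String × List (List (String × String)))) × String :=
  ([("nodes", [[("id", "a"), ("label", "hello")], [("id", "b"), ("desc", "ax")]])], "a")

def Spec_guardian_find (tree : List (String × List (List (String × String)))) (query : String) (out : List (List (String × String))) : Prop := out = guardian_find_alt tree query
instance (tree : List (String × List (List (String × String)))) (query : String) (out : List (List (String × String))) : Decidable (Spec_guardian_find tree query out) := by unfold Spec_guardian_find; infer_instance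

-- ===== CLAIM (what is proved, stated in full; the proofs are below) =====
def Claim_equal_guardian_find : Prop := ∀ (tree : List (String × List (List (String × String)))) (query : String), Dom_guardian_find tree query → Pre_guardian_find tree query → Spec_guardian_find tree query (guardian_find tree query)

-- ===== LEMMAS AND PROOFS =====

-- insertBy places x after a prefix it does not go before and in front of the rest
theorem insertBy_skip {α : Type} (before : α → α → Bool) (x : α) (a rest : List α)
    (ha : ∀ y ∈ a, before x y = false) (hr : ∀ y ∈ rest, before x y = true) :
    PySem.List.insertBy before x (a ++ rest) = a ++ x :: rest := by
  induction a with
  | nil =>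
    cases rest with
    | nil => simp [PySem.List.insertBy]
    | cons y ys => simp [PySem.List.insertBy, hr y (by simp)]
  | cons y a ih =>
    simp only [List.cons_append, PySem.List.insertBy, ha y (by simp)]
    simp only [Bool.false_eq_true, if_false, List.cons.injEq, true_and]
    exact ih (fun z hz => ha z (by simp [hz])) 

-- the bucket invariant for the insertion-sort fold with key (-score), scores in {100,50,40,30}
theorem bucket_fold {α : Type} (l : List (Int × α))
    (hl : ∀ x ∈ l, x.1 = 100 ∨ x.1 = 50 ∨ x.1 = 40 ∨ x.1 = 30) :
    ∀ (a b c d : List (Int × α)),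
      (∀ x ∈ a, x.1 = 100) → (∀ x ∈ b, x.1 = 50) → (∀ x ∈ c, x.1 = 40) → (∀ x ∈ d, x.1 = 30) →
      l.foldl (fun acc x => PySem.List.insertBy (fun u v => decide ((-u.1 : Int) < -v.1)) x acc)
        (a ++ b ++ c ++ d)
      = (a ++ l.filter (fun x => x.1 == 100)) ++ (b ++ l.filter (fun x => x.1 == 50))
        ++ (c ++ l.filter (fun x => x.1 == 40)) ++ (d ++ l.filter (fun x => x.1 == 30)) := by
  induction l with
  | nil => intro a b c d _ _ _ _; simp
  | cons x t ih =>
    intro a b c d ha hb hc hd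
    have hx := hl x (by simp)
    have ht : ∀ y ∈ t, y.1 = 100 ∨ y.1 = 50 ∨ y.1 = 40 ∨ y.1 = 30 := fun y hy => hl y (by simp [hy])
    simp only [List.foldl_cons]
    rcases hx with h | h | h | h
    · have : PySem.List.insertBy (fun u v => decide ((-u.1 : Int) < -v.1)) x (a ++ b ++ c ++ d)
          = (a ++ [x]) ++ b ++ c ++ d := by
        have := insertBy_skip (fun u v => decide ((-u.1 : Int) < -v.1)) x a (b ++ c ++ d)
          (fun y hy => by simp [ha y hy, h])
          (fun y hy => by
            rcases List.mem_append.1 hy with hy | hy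
            · rcases List.mem_append.1 hy with hy | hy
              · simp [hb y hy, h]
              · simp [hc y hy, h]
            · simp [hd y hy, h])
        simpa [List.append_assoc] using this
      rw [this, ih ht (a ++ [x]) b c d (fun y hy => by rcases List.mem_append.1 hy with hy | hy; exacts [ha y hy, by simp only [List.mem_singleton] at hy; rw [hy]; exact h]) hb hc hd]
      simp [h, List.append_assoc]
    · have : PySem.List.insertBy (fun u v => decide ((-u.1 : Int) < -v.1)) x (a ++ b ++ c ++ d)
          = a ++ (b ++ [x]) ++ c ++ d := by
        have := insertBy_skip (fun u v => decide ((-u.1 : Int) < -v.1)) x (a ++ b) (c ++ d)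
          (fun y hy => by
            rcases List.mem_append.1 hy with hy | hy
            · simp [ha y hy, h]
            · simp [hb y hy, h])
          (fun y hy => by
            rcases List.mem_append.1 hy with hy | hy
            · simp [hc y hy, h]
            · simp [hd y hy, h])
        simpa [List.append_assoc] using this
      rw [this, ih ht a (b ++ [x]) c d ha (fun y hy => by rcases List.mem_append.1 hy with hy | hy; exacts [hb y hy, by simp only [List.mem_singleton] at hy; rw [hy]; exact h]) hc hd]
      simp [h, List.append_assoc]
    · have : PySem.List.insertBy (fun u v => decide ((-u.1 : Int) < -v.1)) x (a ++ b ++ c ++ d)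
          = a ++ b ++ (c ++ [x]) ++ d := by
        have := insertBy_skip (fun u v => decide ((-u.1 : Int) < -v.1)) x (a ++ b ++ c) d
          (fun y hy => by
            rcases List.mem_append.1 hy with hy | hy
            · rcases List.mem_append.1 hy with hy | hy
              · simp [ha y hy, h]
              · simp [hb y hy, h]
            · simp [hc y hy, h])
          (fun y hy => by simp [hd y hy, h])
        simpa [List.append_assoc] using this
      rw [this, ih ht a b (c ++ [x]) d ha hb (fun y hy => by rcases List.mem_append.1 hy with hy | hy; exacts [hc y hy, by simp only [List.mem_singleton] at hy; rw [hy]; exact h]) hd]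
      simp [h, List.append_assoc]
    · have : PySem.List.insertBy (fun u v => decide ((-u.1 : Int) < -v.1)) x (a ++ b ++ c ++ d)
          = a ++ b ++ c ++ (d ++ [x]) := by
        have := insertBy_skip (fun u v => decide ((-u.1 : Int) < -v.1)) x (a ++ b ++ c ++ d) []
          (fun y hy => by
            rcases List.mem_append.1 hy with hy | hy
            · rcases List.mem_append.1 hy with hy | hy
              · rcases List.mem_append.1 hy with hy | hy
                · simp [ha y hy, h]
                · simp [hb y hy, h]
              · simp [hc y hy, h]
            · simp [hd y hy, h])
          (by simp)
        simpa [List.append_assoc] using this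
      rw [this, ih ht a b c (d ++ [x]) ha hb hc (fun y hy => by rcases List.mem_append.1 hy with hy | hy; exacts [hd y hy, by simp only [List.mem_singleton] at hy; rw [hy]; exact h])]
      simp [h, List.append_assoc]

-- stable sort by descending score of a {100,50,40,30}-scored list is bucket concatenation
theorem sorted_buckets {α : Type} (l : List (Int × α))
    (hl : ∀ x ∈ l, x.1 = 100 ∨ x.1 = 50 ∨ x.1 = 40 ∨ x.1 = 30) :
    PySem.List.sorted l (fun x => -x.1)
      = l.filter (fun x => x.1 == 100) ++ l.filter (fun x => x.1 == 50)
        ++ l.filter (fun x => x.1 == 40) ++ l.filter (fun x => x.1 == 30) := by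
  rw [PySem.List.sorted_eq_foldl_insertBy]
  have := bucket_fold l hl [] [] [] [] (by simp) (by simp) (by simp) (by simp)
  simpa [List.append_assoc] using this

-- the possible values of A's score chain
theorem gfScore_cases (ql : String) (n : List (String × String)) :
    gfScore ql n = 100 ∨ gfScore ql n = 50 ∨ gfScore ql n = 40 ∨ gfScore ql n = 30 ∨ gfScore ql n = 0 := by
  unfold gfScore; split_ifs <;> simp

-- B's fold with generalized accumulator: each bucket is a filter by the score value
theorem alt_fold (q : String) (nodes : List (List (String × String))) :
    ∀ (a b c d : List (List (String × String))),
      nodes.foldl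
        (fun (bs : List (List (String × String)) × List (List (String × String)) × List (List (String × String)) × List (List (String × String))) n =>
          if PySem.Str.lower ((PySem.Dict.get? (PySem.Dict.mk n) "id").getD "") == q then (bs.1 ++ [n], bs.2.1, bs.2.2.1, bs.2.2.2)
          else if PySem.Str.isIn q (PySem.Str.lower (PySem.Dict.getD (PySem.Dict.mk n) "label" "")) then (bs.1, bs.2.1 ++ [n], bs.2.2.1, bs.2.2.2)
          else if PySem.Str.isIn q (PySem.Str.lower (PySem.Dict.getD (PySem.Dict.mk n) "entry" "")) then (bs.1, bs.2.1, bs.2.2.1 ++ [n], bs.2.2.2)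
          else if PySem.Str.isIn q (PySem.Str.lower (PySem.Dict.getD (PySem.Dict.mk n) "desc" "")) then (bs.1, bs.2.1, bs.2.2.1, bs.2.2.2 ++ [n])
          else bs)
        (a, b, c, d)
      = (a ++ nodes.filter (fun n => gfScore q n == 100),
         b ++ nodes.filter (fun n => gfScore q n == 50),
         c ++ nodes.filter (fun n => gfScore q n == 40),
         d ++ nodes.filter (fun n => gfScore q n == 30)) := by
  induction nodes with
  | nil => intro a b c d; simp
  | cons n t ih =>
    intro a b c d
    simp only [List.foldl_cons]
    by_cases h1 : PySem.Str.lower ((PySem.Dict.get? (PySem.Dict.mk n) "id").getD "") == q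
    · have hs : gfScore q n = 100 := by simp only [gfScore, h1, if_true]
      simp only [h1, if_true, ih, List.filter_cons]
      simp [hs, List.append_assoc]
    · by_cases h2 : PySem.Str.isIn q (PySem.Str.lower (PySem.Dict.getD (PySem.Dict.mk n) "label" ""))
      · have hs : gfScore q n = 50 := by simp only [gfScore, h1, h2, Bool.false_eq_true, if_false, if_true]
        simp only [h1, h2, if_true, Bool.false_eq_true, if_false, ih, List.filter_cons]
        simp [hs, List.append_assoc]
      · by_cases h3 : PySem.Str.isIn q (PySem.Str.lower (PySem.Dict.getD (PySem.Dict.mk n) "entry" ""))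
        · have hs : gfScore q n = 40 := by simp only [gfScore, h1, h2, h3, Bool.false_eq_true, if_false, if_true]
          simp only [h1, h2, h3, if_true, Bool.false_eq_true, if_false, ih, List.filter_cons]
          simp [hs, List.append_assoc]
        · by_cases h4 : PySem.Str.isIn q (PySem.Str.lower (PySem.Dict.getD (PySem.Dict.mk n) "desc" ""))
          · have hs : gfScore q n = 30 := by simp only [gfScore, h1, h2, h3, h4, Bool.false_eq_true, if_false, if_true]
            simp only [h1, h2, h3, h4, if_true, Bool.false_eq_true, if_false, ih, List.filter_cons]
            simp [hs, List.append_assoc]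
          · have hs : gfScore q n = 0 := by simp only [gfScore, h1, h2, h3, h4, Bool.false_eq_true, if_false]
            simp only [h1, h2, h3, h4, Bool.false_eq_true, if_false, ih, List.filter_cons]
            simp [hs]

-- filtering the (score, node) pairs by a score value = pairing the nodes filtered by that value
theorem filter_pairs (q : String) (nodes : List (List (String × String))) (k : Int) :
    (((nodes.filter (fun n => decide (0 < gfScore q n))).map (fun n => (gfScore q n, n))).filter
        (fun x => x.1 == k)).map (fun x => x.2)
      = nodes.filter (fun n => (gfScore q n == k && decide (0 < gfScore q n))) := by
  rw [List.filter_map, List.map_map, List.filter_filter]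
  simp [Function.comp_def]

-- inside a score-k filter the 0 < score test is redundant (k > 0)
theorem filter_pos_drop (q : String) (nodes : List (List (String × String))) (k : Int) (hk : 0 < k) :
    nodes.filter (fun n => (gfScore q n == k && decide (0 < gfScore q n)))
      = nodes.filter (fun n => gfScore q n == k) := by
  apply List.filter_congr
  intro n _
  by_cases h : gfScore q n = k
  · simp [h, hk]
  · simp [h]

-- ===== VERDICT (by name: the statement is the Claim_ definition above) =====
theorem guardian_find_spec : Claim_equal_guardian_find := by
  intro tree query _ _
  unfold Spec_guardian_find guardian_find guardian_find_alt
  simp only []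
  set ql := PySem.Str.lower query with hql
  set nodes := (PySem.Dict.get? (PySem.Dict.mk tree) "nodes").getD [] with hnodes
  rw [PySem.List.foldl_append_if (fun n => decide (0 < gfScore ql n)) (fun n => (gfScore ql n, n)) nodes []]
  simp only [List.nil_append]
  set l := (nodes.filter (fun n => decide (0 < gfScore ql n))).map (fun n => (gfScore ql n, n)) with hldef
  have hl : ∀ x ∈ l, x.1 = 100 ∨ x.1 = 50 ∨ x.1 = 40 ∨ x.1 = 30 := by
    intro x hx
    rw [hldef] at hx
    rcases List.mem_map.1 hx with ⟨n, hn, rfl⟩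
    have hpos : (0:Int) < gfScore ql n := by
      have := List.of_mem_filter hn; simpa using this
    rcases gfScore_cases ql n with h | h | h | h | h <;> simp [h] <;> omega
  rw [sorted_buckets l hl]
  rw [alt_fold ql nodes [] [] [] []]
  simp only [List.nil_append, List.map_append]
  rw [hldef, filter_pairs, filter_pairs, filter_pairs, filter_pairs,
    filter_pos_drop ql nodes 100 (by norm_num), filter_pos_drop ql nodes 50 (by norm_num),
    filter_pos_drop ql nodes 40 (by norm_num), filter_pos_drop ql nodes 30 (by norm_num)]
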